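-- pv_equiv track=rewrite | github.com/Project-Phaistos/Ventris1 | pillar5/scripts/test_r2_filtered_stability.py | build_chains_from_lost
-- ===== SOURCE A (Python) =====
-- def build_chains_from_lost(lost_sequences: list[str]) -> dict[str, list[str]]:
--     """Build progressive chains for validation data (character-by-character)."""
--     sorted_seqs = sorted(set(lost_sequences), key=lambda s: (len(s), s))
--     chains: dict[str, list[str]] = {}
--     seq_to_root: dict[str, str] = {}
--
--     for seq in sorted_seqs:
--         placed = False
--         for prefix_len in range(len(seq) - 1, 0, -1):
--             prefix = seq[:prefix_len]
--             if prefix in seq_to_root: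
--                 root = seq_to_root[prefix]
--                 chains[root].append(seq)
--                 seq_to_root[seq] = root
--                 placed = True
--                 break
--         if not placed:
--             chains[seq] = [seq]
--             seq_to_root[seq] = seq
--
--     for root in chains:
--         chains[root].sort(key=len)
--     return chains
-- ===== SOURCE B (Python) =====
-- def build_chains_from_lost(lost_sequences: list[str]) -> dict[str, list[str]]:
--     """Build progressive chains for validation data (character-by-character)."""
--     # One lexicographic sweep with a prefix stack: after popping the entries that
--     # are not prefixes of s, the top of the stack is the longest nonempty proper
--     # prefix of s among the distinct sequences, instead of probing every prefix length.
--     pairs = []  # (sequence, root of its chain)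
--     stack = []  # (sequence, root); the sequences on the stack form a prefix chain
--     for s in sorted(set(lost_sequences)):
--         while stack and not s.startswith(stack[-1][0]):
--             stack.pop()
--         r = stack[-1][1] if stack else s
--         pairs.append((s, r))
--         if s:  # the empty string is never a nonempty prefix of anything
--             stack.append((s, r))
--     # Grouping pass: emit members in (length, lexicographic) order, grouped by root.
--     chains: dict[str, list[str]] = {}
--     for s, r in sorted(pairs, key=lambda p: (len(p[0]), p[0])):
--         chains.setdefault(r, []).append(s)
--     return chains
-- ===== Notes on version B (the rewrite author's own statement) =====
-- stated objective: alternative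
-- what changed: Replaces the per-sequence descending scan over all prefix lengths against a growing dict with a single lexicographic sweep holding a stack of prefix-chain entries (the popped stack top is the longest existing nonempty proper prefix), plus one grouping pass; the final per-chain sort disappears because members are emitted already in (length, lex) order.
import Mathlib
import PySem

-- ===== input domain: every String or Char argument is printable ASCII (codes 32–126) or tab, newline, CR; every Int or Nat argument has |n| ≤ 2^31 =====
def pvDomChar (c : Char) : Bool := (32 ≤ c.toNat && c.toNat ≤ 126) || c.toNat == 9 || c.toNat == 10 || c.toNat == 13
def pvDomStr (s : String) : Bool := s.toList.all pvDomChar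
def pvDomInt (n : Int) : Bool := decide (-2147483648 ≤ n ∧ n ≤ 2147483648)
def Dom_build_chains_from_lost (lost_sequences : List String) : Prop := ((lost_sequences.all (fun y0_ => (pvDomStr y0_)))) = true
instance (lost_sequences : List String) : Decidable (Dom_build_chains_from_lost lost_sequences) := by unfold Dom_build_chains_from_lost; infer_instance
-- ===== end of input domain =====

-- B replaces A's per-sequence descending probe over all prefix lengths by one lexicographic
-- sweep with a prefix stack plus a grouping pass (objective: alternative algorithm, same cost).


-- ===== PORT A =====
-- 'for prefix_len in range(len(seq)-1, 0, -1): if seq[:prefix_len] in seq_to_root: root = seq_to_root[prefix]; break'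
def pvProbe (s2r : PySem.Dict String String) (seq : String) : List Int → Option String
  | [] => none
  | k :: rest =>
      let pfx := PySem.Str.slice seq none (some k)
      if s2r.contains pfx then s2r.get? pfx else pvProbe s2r seq rest

-- one iteration of 'for seq in sorted_seqs' on the state (chains, seq_to_root);
-- 'chains[root].append(seq)' is Dict.modify (root is always a key when that branch runs, so no KeyError)
def pvStepA (st : PySem.Dict String (List String) × PySem.Dict String String) (seq : String) :
    PySem.Dict String (List String) × PySem.Dict String String :=
  match pvProbe st.2 seq (PySem.List.pyRange (PySem.Str.len seq - 1) 0 (-1)) with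
  | some root => (st.1.modify root [] (fun l => l ++ [seq]), st.2.insert seq root)
  | none => (st.1.insert seq [seq], st.2.insert seq seq)

def build_chains_from_lost (lost_sequences : List String) : List (String × List String) :=
  let sorted_seqs := PySem.List.sorted2 (PySem.Set.ofList lost_sequences)
      (fun s => PySem.Str.len s) (fun s => s) false
  let st := sorted_seqs.foldl pvStepA (PySem.Dict.empty, PySem.Dict.empty)
  -- 'for root in chains: chains[root].sort(key=len)' sorts each value in place, keys unchanged
  st.1.items.map (fun p => (p.1, PySem.List.sorted p.2 (fun x => PySem.Str.len x) false))

-- ===== PORT B =====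
-- 'while stack and not s.startswith(stack[-1][0]): stack.pop()'  (stack kept top-first: push = cons)
def pvPop (s : String) : List (String × String) → List (String × String)
  | [] => []
  | (t, r) :: rest => if PySem.Str.startswith s t then (t, r) :: rest else pvPop s rest

-- one iteration of the lexicographic sweep on the state (pairs, stack)
def pvStepB (acc : List (String × String) × List (String × String)) (s : String) :
    List (String × String) × List (String × String) :=
  let stack := pvPop s acc.2
  let r := match stack with | [] => s | (_, rt) :: _ => rt
  (acc.1 ++ [(s, r)], if PySem.Str.len s = 0 then stack else (s, r) :: stack)

def build_chains_from_lost_alt (lost_sequences : List String) : List (String × List String) :=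
  let pairs := ((PySem.List.sorted (PySem.Set.ofList lost_sequences) (fun s => s) false).foldl
      pvStepB ([], [])).1
  let ordered := PySem.List.sorted2 pairs (fun p => PySem.Str.len p.1) (fun p => p.1) false
  -- 'chains.setdefault(r, []).append(s)'  =  chains[r] = chains.get(r, []) + [s]
  (ordered.foldl (fun d p => d.modify p.2 [] (fun l => l ++ [p.1])) PySem.Dict.empty).items

-- ===== PRECONDITION & SPEC =====
def Spec_build_chains_from_lost (lost_sequences : List String) (out : List (String × List String)) : Prop := out = build_chains_from_lost_alt lost_sequences
instance (lost_sequences : List String) (out : List (String × List String)) : Decidable (Spec_build_chains_from_lost lost_sequences out) := by unfold Spec_build_chains_from_lost; infer_instance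

-- ===== CLAIM (what is proved, stated in full; the proofs are below) =====
def Claim_equal_build_chains_from_lost : Prop := ∀ (lost_sequences : List String), Dom_build_chains_from_lost lost_sequences → Spec_build_chains_from_lost lost_sequences (build_chains_from_lost lost_sequences)

-- ===== LEMMAS AND PROOFS =====

-- pp S s: the longest nonempty proper prefix of s among S, found by scanning lengths downward
def ppAux (S : List String) (cs : List Char) : Nat → Option String
  | 0 => none
  | Nat.succ k =>
      if String.ofList (cs.take (k+1)) ∈ S then some (String.ofList (cs.take (k+1))) else ppAux S cs k

def pp (S : List String) (s : String) : Option String := ppAux S s.toList (s.toList.length - 1)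

-- the chain root of s: follow pp until it runs out (fuel = |s| suffices)
def rtAux (S : List String) : Nat → String → String
  | 0, s => s
  | Nat.succ f, s => match pp S s with
      | none => s
      | some t => rtAux S f t

def rt (S : List String) (s : String) : String := rtAux S s.toList.length s

-- canonical grouping of the processed list by chain root
def chainsOf (S : List String) (l : List String) : PySem.Dict String (List String) :=
  l.foldl (fun d u => d.modify (rt S u) [] (fun v => v ++ [u])) PySem.Dict.empty

-- the (len, lex) sort key of A
def kA (s : String) : Lex (Int × String) := toLex (PySem.Str.len s, s)

-- ---------- generic list/lex lemmas ----------

theorem pv_lex_of_prefix_ne (u v : List Char) (h : u <+: v) (hne : u ≠ v) :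
    List.Lex (· < ·) u v := by
  induction u generalizing v with
  | nil => cases v with
    | nil => exact absurd rfl hne
    | cons b v' => exact List.Lex.nil
  | cons a u' ih =>
    cases v with
    | nil => exact absurd (List.prefix_nil.mp h) (by simp)
    | cons b v' =>
      rcases List.cons_prefix_cons.mp h with ⟨rfl, h'⟩
      exact List.Lex.cons (ih v' h' (fun he => hne (by rw [he])))

theorem pv_prefix_of_lex_between (u v s : List Char) (hus : u <+: s)
    (huv : u = v ∨ List.Lex (· < ·) u v) (hvs : v = s ∨ List.Lex (· < ·) v s) : u <+: v := by
  induction u generalizing v s with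
  | nil => exact List.nil_prefix
  | cons a u' ih =>
    cases v with
    | nil =>
      rcases huv with h | h
      · exact absurd h.symm (by simp)
      · cases h
    | cons b v' =>
      cases s with
      | nil => exact absurd (List.prefix_nil.mp hus) (by simp)
      | cons c s' =>
        rcases List.cons_prefix_cons.mp hus with ⟨rfl, hus'⟩
        have hab : a = b ∧ (u' = v' ∨ List.Lex (· < ·) u' v') := by
          rcases huv with h | h
          · cases h; exact ⟨rfl, Or.inl rfl⟩
          · cases h with
            | cons h' => exact ⟨rfl, Or.inr h'⟩
            | rel hr =>
              exfalso
              rcases hvs with h2 | h2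
              · have hba : b = a := by injection h2
                exact absurd (hba ▸ hr) (lt_irrefl _)
              · cases h2 with
                | cons _ => exact absurd hr (lt_irrefl _)
                | rel hr2 => exact absurd (hr.trans hr2) (lt_irrefl _)
        rcases hab with ⟨rfl, huv'⟩
        have hvs' : v' = s' ∨ List.Lex (· < ·) v' s' := by
          rcases hvs with h | h
          · exact Or.inl (by injection h)
          · cases h with
            | cons h' => exact Or.inr h'
            | rel hr => exact absurd hr (lt_irrefl _)
        exact List.cons_prefix_cons.mpr ⟨rfl, ih v' s' hus' huv' hvs'⟩

theorem pv_pairwise_lt_of_le_nodup {α κ : Type} [LinearOrder κ] (key : α → κ) (l : List α)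
    (h1 : l.Pairwise (fun a b => key a ≤ key b)) (h2 : l.Nodup)
    (hinj : ∀ a b : α, key a = key b → a = b) :
    l.Pairwise (fun a b => key a < key b) :=
  (h1.and h2).imp (fun {a b} h => lt_of_le_of_ne h.1 (fun he => h.2 (hinj a b he)))

theorem pv_mem_left_of_pairwise_lt {α κ : Type} [LinearOrder κ] (key : α → κ)
    (L pre post : List α) (s t : α) (hL : L = pre ++ s :: post)
    (hp : L.Pairwise (fun a b => key a < key b)) (ht : t ∈ L) (hlt : key t < key s) : t ∈ pre := by
  subst hL
  rcases List.mem_append.mp ht with h | h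
  · exact h
  · exfalso
    have hp2 := (List.pairwise_append.mp hp).2.1
    rcases List.mem_cons.mp h with rfl | h
    · exact absurd hlt (lt_irrefl _)
    · exact absurd ((List.pairwise_cons.mp hp2).1 t h) (fun h2 => absurd (hlt.trans h2) (lt_irrefl _))

theorem pv_mem_le_getLast {α : Type} [LinearOrder α] (l : List α) (u prev : α)
    (hp : l.Pairwise (· < ·)) (hu : u ∈ l) (hl : l.getLast? = some prev) : u ≤ prev := by
  induction l with
  | nil => cases hu
  | cons a l ih =>
    cases l with
    | nil =>
      simp at hl hu; subst hl; subst hu; exact le_refl _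
    | cons b l' =>
      rw [List.getLast?_cons_cons] at hl
      rcases List.mem_cons.mp hu with rfl | hu'
      · have hprev : prev ∈ b :: l' := List.mem_of_getLast? hl
        exact le_of_lt ((List.pairwise_cons.mp hp).1 prev hprev)
      · exact ih (List.pairwise_cons.mp hp).2 hu' hl

-- sorted2 is sorted with the lexicographic pair key
theorem pv_sorted2_eq_sorted_lex {α κ₁ κ₂ : Type} [LinearOrder κ₁] [LinearOrder κ₂]
    (xs : List α) (k1 : α → κ₁) (k2 : α → κ₂) :
    PySem.List.sorted2 xs k1 k2 false =
      PySem.List.sorted xs (fun a => toLex (k1 a, k2 a)) false := by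
  have hcmp : ∀ a b : α,
      (decide (k1 a < k1 b) || (!decide (k1 b < k1 a) && decide (k2 a < k2 b)))
        = decide (toLex (k1 a, k2 a) < toLex (k1 b, k2 b)) := by
    intro a b
    rcases lt_trichotomy (k1 a) (k1 b) with h | h | h
    · simp [h, Prod.Lex.lt_iff]
    · simp [h, Prod.Lex.lt_iff]
    · simp [lt_asymm h, h.ne', Prod.Lex.lt_iff, h]
  unfold PySem.List.sorted2 PySem.List.sorted
  simp only [Bool.false_eq_true, if_false]
  congr 1
  funext acc x
  congr 1
  funext a b
  exact hcmp a b

-- ---------- pp / rt facts ----------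

theorem ppAux_some (S : List String) (cs : List Char) (k : Nat) (t : String)
    (h : ppAux S cs k = some t) :
    ∃ j, 1 ≤ j ∧ j ≤ k ∧ t = String.ofList (cs.take j) ∧ t ∈ S ∧
      ∀ i, j < i → i ≤ k → String.ofList (cs.take i) ∉ S := by
  induction k with
  | zero => simp [ppAux] at h
  | succ k ih =>
    by_cases h1 : String.ofList (cs.take (k+1)) ∈ S
    · rw [ppAux, if_pos h1] at h
      obtain rfl := (Option.some.inj h).symm
      exact ⟨k+1, by omega, le_refl _, rfl, h1, by intro i hi1 hi2; omega⟩
    · rw [ppAux, if_neg h1] at h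
      obtain ⟨j, hj1, hj2, hj3, hj4, hj5⟩ := ih h
      refine ⟨j, hj1, by omega, hj3, hj4, ?_⟩
      intro i hi1 hi2
      rcases Nat.lt_succ_iff_lt_or_eq.mp (Nat.lt_succ_of_le hi2) with h' | rfl
      · exact hj5 i hi1 (by omega)
      · exact h1
  
theorem ppAux_none (S : List String) (cs : List Char) (k : Nat)
    (h : ppAux S cs k = none) : ∀ j, 1 ≤ j → j ≤ k → String.ofList (cs.take j) ∉ S := by
  induction k with
  | zero => intro j h1 h2; omega
  | succ k ih =>
    intro j h1 h2
    by_cases h3 : String.ofList (cs.take (k+1)) ∈ S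
    · simp [ppAux, h3] at h
    · rw [ppAux, if_neg h3] at h
      rcases Nat.lt_succ_iff_lt_or_eq.mp (Nat.lt_succ_of_le h2) with h' | rfl
      · exact ih h j h1 (by omega)
      · exact h3

theorem ppAux_congr (S K : List String) (cs : List Char) (k : Nat)
    (h : ∀ j, 1 ≤ j → j ≤ k → (String.ofList (cs.take j) ∈ K ↔ String.ofList (cs.take j) ∈ S)) :
    ppAux K cs k = ppAux S cs k := by
  induction k with
  | zero => rfl
  | succ k ih =>
    rw [ppAux, ppAux]
    by_cases h1 : String.ofList (cs.take (k+1)) ∈ S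
    · rw [if_pos ((h (k+1) (by omega) (le_refl _)).mpr h1), if_pos h1]
    · rw [if_neg (fun hk => h1 ((h (k+1) (by omega) (le_refl _)).mp hk)), if_neg h1]
      exact ih (fun j hj1 hj2 => h j hj1 (by omega))

theorem pp_spec_some (S : List String) (s t : String) (h : pp S s = some t) :
    t ∈ S ∧ t.toList <+: s.toList ∧ t.toList ≠ [] ∧ t.toList.length < s.toList.length ∧
      ∀ u ∈ S, u.toList <+: s.toList → u ≠ s → u.toList.length ≤ t.toList.length := by
  unfold pp at h
  obtain ⟨j, hj1, hj2, hj3, hj4, hj5⟩ := ppAux_some _ _ _ _ h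
  have hn : 1 ≤ s.toList.length := by omega
  have hjlen : j ≤ s.toList.length - 1 := hj2
  have htl : t.toList = s.toList.take j := by rw [hj3, String.toList_ofList]
  have htlen : t.toList.length = j := by rw [htl, List.length_take]; omega
  refine ⟨hj4, by rw [htl]; exact List.take_prefix _ _, by
      rw [← List.length_pos_iff]; omega, by omega, ?_⟩
  intro u hu hupre hune
  by_contra hlt
  rw [not_le] at hlt
  rw [htlen] at hlt
  have hueq : u.toList = s.toList.take u.toList.length := List.prefix_iff_eq_take.mp hupre
  have hulen : u.toList.length ≤ s.toList.length := hupre.length_le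
  have hune' : u.toList.length ≠ s.toList.length := by
    intro he
    rw [he, List.take_length] at hueq
    exact hune (String.toList_inj.mp hueq)
  refine hj5 u.toList.length hlt (by omega) ?_
  rw [← hueq, String.ofList_toList]
  exact hu

theorem pp_spec_none (S : List String) (s : String) (h : pp S s = none) :
    ∀ u ∈ S, u.toList <+: s.toList → u.toList ≠ [] → u ≠ s → False := by
  intro u hu hupre hune huns
  have hueq : u.toList = s.toList.take u.toList.length := List.prefix_iff_eq_take.mp hupre
  have hulen : u.toList.length ≤ s.toList.length := hupre.length_le
  have hune' : u.toList.length ≠ s.toList.length := by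
    intro he
    rw [he, List.take_length] at hueq
    exact huns (String.toList_inj.mp hueq)
  have h1 : 1 ≤ u.toList.length := by
    rcases Nat.eq_zero_or_pos u.toList.length with h' | h'
    · exact absurd (List.length_eq_zero_iff.mp h') hune
    · exact h'
  refine ppAux_none _ _ _ h u.toList.length h1 (by omega) ?_
  rw [← hueq, String.ofList_toList]
  exact hu

theorem pp_eq_some (S : List String) (s t : String) (ht : t ∈ S)
    (hpre : t.toList <+: s.toList) (hne : t.toList ≠ []) (hts : t ≠ s)
    (hmax : ∀ u ∈ S, u.toList <+: s.toList → u ≠ s → u.toList.length ≤ t.toList.length) :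
    pp S s = some t := by
  cases hpp : pp S s with
  | none => exact absurd (pp_spec_none S s hpp t ht hpre hne hts) (fun h => h)
  | some t' =>
    obtain ⟨ht'S, ht'pre, _, ht'len, ht'max⟩ := pp_spec_some S s t' hpp
    have h1 : t.toList.length ≤ t'.toList.length := ht'max t ht hpre hts
    have h2 : t'.toList.length ≤ t.toList.length :=
      hmax t' ht'S ht'pre (fun he => by rw [he] at ht'len; omega)
    have he : t.toList = t'.toList := by
      rw [List.prefix_iff_eq_take.mp hpre, List.prefix_iff_eq_take.mp ht'pre]
      congr 1
      omega
    rw [String.toList_inj.mp he]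

theorem rtAux_fuel (S : List String) : ∀ (f : Nat) (s : String), s.toList.length ≤ f →
    rtAux S f s = rtAux S s.toList.length s := by
  intro f
  induction f using Nat.strong_induction_on with
  | _ f ih =>
    intro s hf
    match f with
    | 0 => have : s.toList.length = 0 := by omega
           rw [this]
    | Nat.succ g =>
      cases hpp : pp S s with
      | none =>
        cases hn : s.toList.length with
        | zero => simp [rtAux, hpp]
        | succ m => simp [rtAux, hpp]
      | some t =>
        obtain ⟨_, _, _, hlen, _⟩ := pp_spec_some S s t hpp
        cases hn : s.toList.length with
        | zero => omega
        | succ m =>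
          rw [hn] at hlen
          have e1 : rtAux S (Nat.succ g) s = rtAux S g t := by simp [rtAux, hpp]
          have e2 : rtAux S (Nat.succ m) s = rtAux S m t := by simp [rtAux, hpp]
          rw [e1, e2]
          rw [ih g (by omega) t (by omega), ih m (by omega) t (by omega)]

theorem rt_of_pp_none (S : List String) (s : String) (h : pp S s = none) : rt S s = s := by
  unfold rt
  cases hn : s.toList.length with
  | zero => rfl
  | succ m => simp [rtAux, h]

theorem rt_of_pp_some (S : List String) (s t : String) (h : pp S s = some t) :
    rt S s = rt S t := by
  obtain ⟨_, _, _, hlen, _⟩ := pp_spec_some S s t h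
  unfold rt
  cases hn : s.toList.length with
  | zero => omega
  | succ m =>
    have e : rtAux S (Nat.succ m) s = rtAux S m t := by simp [rtAux, h]
    rw [e, rtAux_fuel S m t (by omega)]

theorem rt_prefix (S : List String) (s : String) : (rt S s).toList <+: s.toList := by
  induction hn : s.toList.length using Nat.strong_induction_on generalizing s with
  | _ n ih =>
    cases hpp : pp S s with
    | none => rw [rt_of_pp_none S s hpp]
    | some t =>
      obtain ⟨_, hpre, _, hlen, _⟩ := pp_spec_some S s t hpp
      rw [rt_of_pp_some S s t hpp]
      exact (ih t.toList.length (by omega) t rfl).trans hpre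

-- ---------- A-side ----------

theorem pv_probe_eq (s2r : PySem.Dict String String) (seq : String) (k : Nat) :
    pvProbe s2r seq (PySem.List.pyRange (k : Int) 0 (-1)) =
      (ppAux s2r.keys seq.toList k).bind (fun p => s2r.get? p) := by
  induction k with
  | zero =>
    rw [PySem.List.pyRange_neg_one_eq_nil (by norm_num)]
    rfl
  | succ k ih =>
    have hcast : ((Nat.succ k : Nat) : Int) = ((k : Int) + 1) := by push_cast; ring
    rw [hcast, PySem.List.pyRange_neg_one_cons (by positivity),
      show (k : Int) + 1 - 1 = (k : Int) from by ring]
    have hslice : PySem.Str.slice seq none (some ((k : Int) + 1)) =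
        String.ofList (seq.toList.take (k+1)) := by
      have hsl : PySem.List.slice seq.toList none (some ((k : Int) + 1)) = seq.toList.take (k+1) := by
        rw [show ((k : Int) + 1) = (((k+1 : Nat)) : Int) from by push_cast; ring]
        exact PySem.List.slice_to_natCast _ _
      simp [PySem.Str.slice, PySem.Chars.slice, hsl]
    simp only [pvProbe, hslice]
    rw [PySem.Dict.contains_eq_decide_mem_keys]
    by_cases hmem : String.ofList (seq.toList.take (k+1)) ∈ s2r.keys
    · simp [hmem, ppAux]
    · simp [hmem, ppAux, ih]
  

theorem pv_kA_inj (a b : String) (h : kA a = kA b) : a = b := by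
  have := congrArg (fun x => (ofLex x).2) h
  simpa [kA] using this

theorem pv_kA_lt_of_len_lt (a b : String) (h : a.toList.length < b.toList.length) :
    kA a < kA b := by
  rw [kA, kA, Prod.Lex.lt_iff]
  left
  simp only [ofLex_toLex, PySem.Str.len_eq]
  exact_mod_cast h

theorem pv_len_le_of_kA_lt (a b : String) (h : kA a < kA b) :
    a.toList.length ≤ b.toList.length := by
  rw [kA, kA, Prod.Lex.lt_iff] at h
  simp only [ofLex_toLex, PySem.Str.len_eq] at h
  rcases h with h | ⟨h, _⟩
  · exact_mod_cast le_of_lt h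
  · exact le_of_eq (by exact_mod_cast h)

-- invariant of A's main loop
def AInv (S pre : List String)
    (st : PySem.Dict String (List String) × PySem.Dict String String) : Prop :=
  st.1 = chainsOf S pre ∧ st.2.keys = pre ∧ ∀ t ∈ pre, st.2.get? t = some (rt S t)

theorem pv_stepA (S LA pre rest : List String) (s : String)
    (st : PySem.Dict String (List String) × PySem.Dict String String)
    (hperm : LA.Perm S) (hpw : LA.Pairwise (fun a b => kA a < kA b))
    (hL : LA = pre ++ s :: rest) (hinv : AInv S pre st) :
    AInv S (pre ++ [s]) (pvStepA st s) := by
  obtain ⟨hc, hk, hg⟩ := hinv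
  have hNd : LA.Nodup := hpw.imp (fun {a b} h => fun he => absurd (he ▸ h) (lt_irrefl _))
  have hs_not_pre : s ∉ pre := by
    rw [hL] at hNd
    rcases List.nodup_append.mp hNd with ⟨_, _, hdisj⟩
    exact fun h => hdisj s h s (by simp) rfl
  have hclos : ∀ u, u ∈ S → kA u < kA s → u ∈ pre := fun u hu hlt =>
    pv_mem_left_of_pairwise_lt kA LA pre rest s u hL hpw (hperm.mem_iff.mpr hu) hlt
  have hpre_sub : ∀ u, u ∈ pre → u ∈ S := fun u hu =>
    hperm.mem_iff.mp (hL ▸ List.mem_append_left _ hu)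
  have hkeys_iff : ∀ j, 1 ≤ j → j ≤ s.toList.length - 1 →
      (String.ofList (s.toList.take j) ∈ st.2.keys ↔ String.ofList (s.toList.take j) ∈ S) := by
    intro j hj1 hj2
    rw [hk]
    constructor
    · exact fun h => hpre_sub _ h
    · intro h
      refine hclos _ h (pv_kA_lt_of_len_lt _ _ ?_)
      rw [String.toList_ofList, List.length_take]
      omega
  have hprobe : pvProbe st.2 s (PySem.List.pyRange (PySem.Str.len s - 1) 0 (-1)) =
      (pp S s).bind (fun t => st.2.get? t) := by
    cases hn : s.toList.length with
    | zero =>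
      have hr : PySem.Str.len s - 1 = (-1 : Int) := by rw [PySem.Str.len_eq, hn]; norm_num
      rw [hr, PySem.List.pyRange_neg_one_eq_nil (by norm_num)]
      simp [pvProbe, pp, hn, ppAux]
    | succ m =>
      have hr : PySem.Str.len s - 1 = ((m : Nat) : Int) := by
        rw [PySem.Str.len_eq, hn]; push_cast; ring
      rw [hr, pv_probe_eq,
        ppAux_congr S st.2.keys s.toList m (fun j hj1 hj2 => hkeys_iff j hj1 (by omega))]
      unfold pp
      rw [hn]
      norm_num
  have hkeysCh : st.1.keys = PySem.Set.update (PySem.Dict.empty : PySem.Dict String (List String)).keys (pre.map (rt S)) := by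
    rw [hc]
    exact PySem.Dict.keys_foldl_modify_key pre (rt S) [] (fun _ x v => v ++ [x]) PySem.Dict.empty
  have hch_not : st.1.contains s = false := by
    rw [PySem.Dict.contains_eq_decide_mem_keys, hkeysCh]
    simp only [decide_eq_false_iff_not]
    intro hmem
    rcases (PySem.Set.mem_union _ _ _).mp hmem with h | h
    · simp [PySem.Dict.keys_empty] at h
    · obtain ⟨u, hu, hu2⟩ := List.mem_map.mp h
      have h1 : s.toList <+: u.toList := hu2 ▸ rt_prefix S u
      have h2 : kA u < kA s := (List.pairwise_append.mp (hL ▸ hpw)).2.2 u hu s List.mem_cons_self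
      have h3 : u.toList.length ≤ s.toList.length := pv_len_le_of_kA_lt u s h2
      have h4 : u.toList = s.toList := (List.IsPrefix.eq_of_length_le h1 (by
        have := h1.length_le
        omega)).symm ▸ rfl
      exact absurd (String.toList_inj.mp h4 ▸ h2) (lt_irrefl _)
  have hs2r_not : st.2.contains s = false := by
    rw [PySem.Dict.contains_eq_decide_mem_keys, hk]
    simpa using hs_not_pre
  cases hpp : pp S s with
  | none =>
    have hrt : rt S s = s := rt_of_pp_none S s hpp
    have hred : pvStepA st s = (st.1.insert s [s], st.2.insert s s) := by
      unfold pvStepA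
      rw [hprobe, hpp]
      rfl
    rw [hred]
    refine ⟨?_, ?_, ?_⟩
    · show st.1.insert s [s] = chainsOf S (pre ++ [s])
      unfold chainsOf
      rw [List.foldl_append]
      show _ = (chainsOf S pre).modify (rt S s) [] (fun v => v ++ [s])
      rw [hrt, ← hc]
      have hgetD : st.1.getD s [] = [] := PySem.Dict.getD_of_not_contains _ _ hch_not
      show st.1.insert s [s] = st.1.insert s (st.1.getD s [] ++ [s])
      rw [hgetD]
      rfl
    · show (st.2.insert s s).keys = pre ++ [s]
      rw [PySem.Dict.keys_insert_of_not_contains _ _ hs2r_not, hk]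
    · intro t ht
      rw [PySem.Dict.get?_insert]
      rcases List.mem_append.mp ht with h | h
      · rw [if_neg (show ¬ (t = s) from fun he => hs_not_pre (he ▸ h))]
        exact hg t h
      · have : t = s := by simpa using h
        subst this
        rw [if_pos rfl, hrt]
  | some t =>
    obtain ⟨htS, htpre, htne, htlen, _⟩ := pp_spec_some S s t hpp
    have htpre' : t ∈ pre := hclos t htS (pv_kA_lt_of_len_lt t s htlen)
    have hget : st.2.get? t = some (rt S t) := hg t htpre'
    have hrt : rt S s = rt S t := rt_of_pp_some S s t hpp
    have hred : pvStepA st s =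
        (st.1.modify (rt S s) [] (fun l => l ++ [s]), st.2.insert s (rt S s)) := by
      unfold pvStepA
      rw [hprobe, hpp]
      show (match st.2.get? t with
        | some root => (st.1.modify root [] (fun l => l ++ [s]), st.2.insert s root)
        | none => (st.1.insert s [s], st.2.insert s s)) = _
      rw [hget, hrt]
    rw [hred]
    refine ⟨?_, ?_, ?_⟩
    · show st.1.modify (rt S s) [] (fun l => l ++ [s]) = chainsOf S (pre ++ [s])
      unfold chainsOf
      rw [List.foldl_append]
      show _ = (chainsOf S pre).modify (rt S s) [] (fun v => v ++ [s])
      rw [← hc]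
    · show (st.2.insert s (rt S s)).keys = pre ++ [s]
      rw [PySem.Dict.keys_insert_of_not_contains _ _ hs2r_not, hk]
    · intro u hu
      rw [PySem.Dict.get?_insert]
      rcases List.mem_append.mp hu with h | h
      · rw [if_neg (show ¬ (u = s) from fun he => hs_not_pre (he ▸ h))]
        exact hg u h
      · have : u = s := by simpa using h
        subst this
        rw [if_pos rfl]

theorem pv_foldA (S LA : List String)
    (hperm : LA.Perm S) (hpw : LA.Pairwise (fun a b => kA a < kA b)) :
    ∀ (rest pre : List String) st, LA = pre ++ rest → AInv S pre st →
      AInv S LA (rest.foldl pvStepA st) := by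
  intro rest
  induction rest with
  | nil => intro pre st hL hinv; simpa [hL] using hinv
  | cons s rest' ih =>
    intro pre st hL hinv
    exact ih (pre ++ [s]) (pvStepA st s) (by rw [hL, List.append_assoc]; rfl)
      (pv_stepA S LA pre rest' s st hperm hpw hL hinv)

-- ---------- B-side ----------

def SInv (S pre : List String) (stack : List (String × String)) : Prop :=
  (∀ p ∈ stack, p.1 ∈ pre ∧ p.1.toList ≠ [] ∧ p.2 = rt S p.1) ∧
  stack.Pairwise (fun a b => b.1.toList <+: a.1.toList ∧ b.1 ≠ a.1) ∧
  (∀ t ∈ pre, t.toList ≠ [] → ∀ last, pre.getLast? = some last →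
    t.toList <+: last.toList → (t, rt S t) ∈ stack)

def BInv (S pre : List String)
    (acc : List (String × String) × List (String × String)) : Prop :=
  acc.1 = pre.map (fun u => (u, rt S u)) ∧ SInv S pre acc.2

theorem pv_popA (s : String) (stack : List (String × String)) :
    ∀ p ∈ pvPop s stack, p ∈ stack := by
  induction stack with
  | nil => intro p hp; exact hp
  | cons q rest ih =>
    intro p hp
    rcases q with ⟨t, r⟩
    rw [pvPop] at hp
    split at hp
    · exact hp
    · exact List.mem_cons_of_mem _ (ih p hp)

theorem pv_popB (s : String) (stack : List (String × String))
    (hpw : stack.Pairwise (fun a b => b.1.toList <+: a.1.toList ∧ b.1 ≠ a.1)) :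
    ∀ p ∈ pvPop s stack, p.1.toList <+: s.toList := by
  induction stack with
  | nil => intro p hp; cases hp
  | cons q rest ih =>
    intro p hp
    rcases q with ⟨t, r⟩
    rw [pvPop] at hp
    split at hp
    · rename_i hsw
      have hts : t.toList <+: s.toList := by
        have := (PySem.Chars.startswith_iff s.toList t.toList).mp
          (by rw [← PySem.Str.startswith_eq]; exact hsw)
        exact this
      rcases List.mem_cons.mp hp with rfl | hp'
      · exact hts
      · exact (((List.pairwise_cons.mp hpw).1 p hp').1).trans hts
    · exact ih (List.pairwise_cons.mp hpw).2 p hp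

theorem pv_popC (s : String) (stack : List (String × String)) :
    ∀ p ∈ stack, p.1.toList <+: s.toList → p ∈ pvPop s stack := by
  induction stack with
  | nil => intro p hp; cases hp
  | cons q rest ih =>
    intro p hp hpre
    rcases q with ⟨t, r⟩
    rw [pvPop]
    split
    · exact hp
    · rename_i hsw
      rcases List.mem_cons.mp hp with rfl | hp'
      · refine absurd ?_ hsw
        rw [PySem.Str.startswith_eq]
        exact (PySem.Chars.startswith_iff s.toList t.toList).mpr hpre
      · exact ih p hp' hpre

theorem pv_popPw (s : String) (stack : List (String × String))
    (hpw : stack.Pairwise (fun a b => b.1.toList <+: a.1.toList ∧ b.1 ≠ a.1)) :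
    (pvPop s stack).Pairwise (fun a b => b.1.toList <+: a.1.toList ∧ b.1 ≠ a.1) := by
  induction stack with
  | nil => exact List.Pairwise.nil
  | cons q rest ih =>
    rcases q with ⟨t, r⟩
    rw [pvPop]
    split
    · exact hpw
    · exact ih (List.pairwise_cons.mp hpw).2

theorem pv_str_lt (a b : String) : a < b ↔ List.Lex (· < ·) a.toList b.toList := by
  rw [String.lt_iff_toList_lt]
  rfl

theorem pv_stepB (S lex pre rest : List String) (s : String)
    (acc : List (String × String) × List (String × String))
    (hperm : lex.Perm S) (hpw : lex.Pairwise (· < ·))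
    (hL : lex = pre ++ s :: rest) (hinv : BInv S pre acc) :
    BInv S (pre ++ [s]) (pvStepB acc s) := by
  obtain ⟨hpairs, hmemb, hchain, hcomp⟩ := hinv
  have hNd : lex.Nodup := hpw.imp (fun {a b} h => ne_of_lt h)
  have hs_not_pre : s ∉ pre := by
    rw [hL] at hNd
    rcases List.nodup_append.mp hNd with ⟨_, _, hdisj⟩
    exact fun h => hdisj s h s (by simp) rfl
  have hpre_pw : pre.Pairwise (· < ·) := (List.pairwise_append.mp (hL ▸ hpw)).1
  have hcross : ∀ u ∈ pre, u < s := fun u hu =>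
    (List.pairwise_append.mp (hL ▸ hpw)).2.2 u hu s (by simp)
  have hpre_sub : ∀ u ∈ pre, u ∈ S := fun u hu =>
    hperm.mem_iff.mp (hL ▸ List.mem_append_left _ hu)
  have hclos : ∀ u, u ∈ S → u < s → u ∈ pre := fun u hu hlt =>
    pv_mem_left_of_pairwise_lt (fun x => x) lex pre rest s u hL hpw (hperm.mem_iff.mpr hu) hlt
  have hinStack : ∀ u, u ∈ S → u.toList ≠ [] → u.toList <+: s.toList → u ≠ s →
      (u, rt S u) ∈ pvPop s acc.2 := by
    intro u hu hune hupre hus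
    have hults : u < s := (pv_str_lt u s).mpr
      (pv_lex_of_prefix_ne _ _ hupre (fun he => hus (String.toList_inj.mp he)))
    have hu_pre : u ∈ pre := hclos u hu hults
    cases hlast : pre.getLast? with
    | none => exact absurd hu_pre (by simp [List.getLast?_eq_none_iff.mp hlast])
    | some prev =>
      have hprev_mem : prev ∈ pre := List.mem_of_getLast? hlast
      have hprev_lt : prev < s := hcross prev hprev_mem
      have hu_le : u ≤ prev := pv_mem_le_getLast pre u prev hpre_pw hu_pre hlast
      have hupv : u.toList <+: prev.toList := by
        refine pv_prefix_of_lex_between u.toList prev.toList s.toList hupre ?_ ?_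
        · rcases lt_or_eq_of_le hu_le with h | h
          · exact Or.inr ((pv_str_lt u prev).mp h)
          · exact Or.inl (by rw [h])
        · exact Or.inr ((pv_str_lt prev s).mp hprev_lt)
      exact pv_popC s acc.2 (u, rt S u) (hcomp u hu_pre hune prev hlast hupv) hupre
  rcases hstack' : pvPop s acc.2 with _ | ⟨⟨t0, r0⟩, stail⟩
  · -- stack empties: s starts a new chain
    have hppn : pp S s = none := by
      cases hpp : pp S s with
      | none => rfl
      | some t =>
        obtain ⟨htS, htpre, htne, htlen, _⟩ := pp_spec_some S s t hpp
        have hmm := hinStack t htS htne htpre (fun he => by rw [he] at htlen; omega)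
        rw [hstack'] at hmm
        cases hmm
    have hrt : rt S s = s := rt_of_pp_none S s hppn
    have hred : pvStepB acc s = (acc.1 ++ [(s, s)],
        if PySem.Str.len s = 0 then ([] : List (String × String)) else [(s, s)]) := by
      unfold pvStepB
      rw [hstack']
    rw [hred]
    refine ⟨?_, ?_⟩
    · rw [List.map_append, hpairs]
      simp [hrt]
    · by_cases hsz : PySem.Str.len s = 0
      · have hsl : s.toList = [] := by
          rw [PySem.Str.len_eq] at hsz
          exact List.length_eq_zero_iff.mp (by exact_mod_cast hsz)
        rw [if_pos hsz]
        refine ⟨by simp, List.Pairwise.nil, ?_⟩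
        intro t ht htne last hlast hpre2
        rw [List.getLast?_concat] at hlast
        obtain rfl := Option.some.inj hlast
        exact absurd (List.prefix_nil.mp (hsl ▸ hpre2)) htne
      · rw [if_neg hsz]
        have hsne : s.toList ≠ [] := by
          intro h
          apply hsz
          rw [PySem.Str.len_eq, h]
          simp
        refine ⟨?_, ?_, ?_⟩
        · intro p hp
          have hps : p = (s, s) := by simpa using hp
          subst hps
          exact ⟨by simp, hsne, hrt.symm⟩
        · simp
        · intro t ht htne last hlast hpre2
          rw [List.getLast?_concat] at hlast
          obtain rfl := Option.some.inj hlast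
          rcases List.mem_append.mp ht with h | h
          · have hmm := hinStack t (hpre_sub t h) htne hpre2 (fun he => hs_not_pre (he ▸ h))
            rw [hstack'] at hmm
            cases hmm
          · have hts : t = s := by simpa using h
            subst hts
            simp [hrt]
  · -- stack top t0 is the longest existing proper prefix of s
    have htop_in : (t0, r0) ∈ pvPop s acc.2 := by rw [hstack']; simp
    have htop_mem : (t0, r0) ∈ acc.2 := pv_popA s acc.2 (t0, r0) htop_in
    obtain ⟨htop_pre, htop_ne, htop_rt⟩ := hmemb (t0, r0) htop_mem
    have htop_pfx : t0.toList <+: s.toList := pv_popB s acc.2 hchain (t0, r0) htop_in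
    have htop_ns : t0 ≠ s := fun he => hs_not_pre (he ▸ htop_pre)
    have hpw' : ((t0, r0) :: stail).Pairwise
        (fun a b => b.1.toList <+: a.1.toList ∧ b.1 ≠ a.1) := by
      rw [← hstack']
      exact pv_popPw s acc.2 hchain
    have hpp : pp S s = some t0 := by
      refine pp_eq_some S s t0 (hpre_sub _ htop_pre) htop_pfx htop_ne htop_ns ?_
      intro u hu hupre hus
      by_cases hune : u.toList = []
      · rw [hune]
        simp
      · have hmm := hinStack u hu hune hupre hus
        rw [hstack'] at hmm
        rcases List.mem_cons.mp hmm with he | hmm2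
        · have : u = t0 := congrArg Prod.fst he
          rw [this]
        · exact ((List.pairwise_cons.mp hpw').1 _ hmm2).1.length_le
    have hrt2 : rt S s = rt S t0 := rt_of_pp_some S s t0 hpp
    have hsne : s.toList ≠ [] := by
      intro h
      exact htop_ne (List.prefix_nil.mp (h ▸ htop_pfx))
    have hsz : ¬ (PySem.Str.len s = 0) := by
      intro h
      apply hsne
      rw [PySem.Str.len_eq] at h
      exact List.length_eq_zero_iff.mp (by exact_mod_cast h)
    have hr0 : r0 = rt S s := by rw [hrt2]; exact htop_rt
    have hred : pvStepB acc s = (acc.1 ++ [(s, r0)], (s, r0) :: (t0, r0) :: stail) := by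
      unfold pvStepB
      rw [hstack']
      show (acc.1 ++ [(s, r0)],
        if PySem.Str.len s = 0 then (t0, r0) :: stail else (s, r0) :: (t0, r0) :: stail) = _
      rw [if_neg hsz]
    rw [hred]
    refine ⟨?_, ?_, ?_, ?_⟩
    · rw [List.map_append, hpairs]
      simp [hr0]
    · intro p hp
      rcases List.mem_cons.mp hp with rfl | hp2
      · exact ⟨by simp, hsne, by simpa using hr0⟩
      · obtain ⟨h1, h2, h3⟩ := hmemb p (pv_popA s acc.2 p (by rw [hstack']; exact hp2))
        exact ⟨List.mem_append_left _ h1, h2, h3⟩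
    · refine List.pairwise_cons.mpr ⟨?_, hpw'⟩
      intro p hp2
      have hpin : p ∈ pvPop s acc.2 := by rw [hstack']; exact hp2
      refine ⟨pv_popB s acc.2 hchain p hpin, ?_⟩
      intro he
      have h1 := (hmemb p (pv_popA s acc.2 p hpin)).1
      rw [he] at h1
      exact hs_not_pre h1
    · intro t ht htne last hlast hpre2
      rw [List.getLast?_concat] at hlast
      obtain rfl := Option.some.inj hlast
      rcases List.mem_append.mp ht with h | h
      · have hmm := hinStack t (hpre_sub t h) htne hpre2 (fun he => hs_not_pre (he ▸ h))
        rw [hstack'] at hmm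
        exact List.mem_cons_of_mem _ hmm
      · have hts : t = s := by simpa using h
        subst hts
        have : (t, rt S t) = (t, r0) := by rw [hr0]
        rw [this]
        simp

theorem pv_foldB (S lex : List String)
    (hperm : lex.Perm S) (hpw : lex.Pairwise (· < ·)) :
    ∀ (rest pre : List String) acc, lex = pre ++ rest → BInv S pre acc →
      BInv S lex (rest.foldl pvStepB acc) := by
  intro rest
  induction rest with
  | nil => intro pre acc hL hinv; simpa [hL] using hinv
  | cons s rest' ih =>
    intro pre acc hL hinv
    exact ih (pre ++ [s]) (pvStepB acc s) (by rw [hL, List.append_assoc]; rfl)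
      (pv_stepB S lex pre rest' s acc hperm hpw hL hinv)

-- ---------- assembly ----------

set_option maxHeartbeats 1000000 in
theorem pv_main (lost : List String) :
    build_chains_from_lost lost = build_chains_from_lost_alt lost := by
  have hSnd : (PySem.Set.ofList lost).Nodup := PySem.Set.nodup_ofList lost
  -- the (len, lex)-sorted distinct list LA
  have hLA_eq : PySem.List.sorted2 (PySem.Set.ofList lost) (fun s => PySem.Str.len s)
      (fun s => s) false
      = PySem.List.sorted (PySem.Set.ofList lost) kA false :=
    pv_sorted2_eq_sorted_lex (PySem.Set.ofList lost) (fun s => PySem.Str.len s) (fun s => s)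
  have hpermA : (PySem.List.sorted (PySem.Set.ofList lost) kA false).Perm
      (PySem.Set.ofList lost) := PySem.List.sorted_perm _ _ _
  have hApw : (PySem.List.sorted (PySem.Set.ofList lost) kA false).Pairwise
      (fun a b => kA a < kA b) :=
    pv_pairwise_lt_of_le_nodup kA _ (PySem.List.sorted_pairwise _ kA)
      (hpermA.nodup_iff.mpr hSnd) pv_kA_inj
  -- the lexicographically sorted distinct list
  have hpermB : (PySem.List.sorted (PySem.Set.ofList lost) (fun s => s) false).Perm
      (PySem.Set.ofList lost) := PySem.List.sorted_perm _ _ _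
  have hBpw : (PySem.List.sorted (PySem.Set.ofList lost) (fun s => s) false).Pairwise
      (· < ·) := PySem.List.sorted_ofList_pairwise_lt lost
  -- run A's loop
  have hstA := pv_foldA (PySem.Set.ofList lost)
      (PySem.List.sorted (PySem.Set.ofList lost) kA false) hpermA hApw
      (PySem.List.sorted (PySem.Set.ofList lost) kA false) []
      (PySem.Dict.empty, PySem.Dict.empty) (List.nil_append _).symm
      ⟨rfl, rfl, fun t ht => absurd ht (List.not_mem_nil)⟩
  -- run B's sweep
  have hstB := pv_foldB (PySem.Set.ofList lost)
      (PySem.List.sorted (PySem.Set.ofList lost) (fun s => s) false) hpermB hBpw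
      (PySem.List.sorted (PySem.Set.ofList lost) (fun s => s) false) []
      ([], []) (List.nil_append _).symm
      ⟨rfl, fun p hp => absurd hp (List.not_mem_nil), List.Pairwise.nil,
        fun t ht => absurd ht (List.not_mem_nil)⟩
  obtain ⟨hpairsEq, _⟩ := hstB
  -- B's second sort produces LA, paired with roots
  have hordEq : PySem.List.sorted2
      ((PySem.List.sorted (PySem.Set.ofList lost) (fun s => s) false).foldl pvStepB ([], [])).1
      (fun p => PySem.Str.len p.1) (fun p => p.1) false
      = (PySem.List.sorted (PySem.Set.ofList lost) kA false).map
          (fun u => (u, rt (PySem.Set.ofList lost) u)) := by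
    rw [hpairsEq, pv_sorted2_eq_sorted_lex]
    refine PySem.List.sorted_eq_of_perm_of_pairwise_lt _ _
      (fun p : String × String => toLex (PySem.Str.len p.1, p.1)) ?_ ?_
    · exact (hpermA.trans hpermB.symm).map _
    · exact List.pairwise_map.mpr hApw
  -- both produce the canonical grouping
  have hgrp : ((PySem.List.sorted (PySem.Set.ofList lost) kA false).map
        (fun u => (u, rt (PySem.Set.ofList lost) u))).foldl
        (fun d p => d.modify p.2 [] (fun l => l ++ [p.1])) PySem.Dict.empty
      = chainsOf (PySem.Set.ofList lost) (PySem.List.sorted (PySem.Set.ofList lost) kA false) := by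
    rw [List.foldl_map]
    rfl
  have hgrp2 : chainsOf (PySem.Set.ofList lost) (PySem.List.sorted (PySem.Set.ofList lost) kA false)
      = ((PySem.List.sorted (PySem.Set.ofList lost) kA false).map
          (fun u => (rt (PySem.Set.ofList lost) u, u))).foldl
          (fun d q => d.modify q.1 [] (fun x => x ++ [q.2])) PySem.Dict.empty := by
    rw [List.foldl_map]
    rfl
  have hnodupkeys : (chainsOf (PySem.Set.ofList lost)
      (PySem.List.sorted (PySem.Set.ofList lost) kA false)).keys.Nodup :=
    PySem.Dict.nodup_keys_foldl_modify_key _ (rt (PySem.Set.ofList lost)) []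
      (fun _ x v => v ++ [x]) PySem.Dict.empty List.nodup_nil
  have hlenpw : (PySem.List.sorted (PySem.Set.ofList lost) kA false).Pairwise
      (fun a b => PySem.Str.len a ≤ PySem.Str.len b) := by
    refine hApw.imp (fun {a b} h => ?_)
    have := pv_len_le_of_kA_lt a b h
    rw [PySem.Str.len_eq, PySem.Str.len_eq]
    exact_mod_cast this
  have hval : ∀ p ∈ (chainsOf (PySem.Set.ofList lost)
      (PySem.List.sorted (PySem.Set.ofList lost) kA false)).items,
      PySem.List.sorted p.2 (fun x => PySem.Str.len x) false = p.2 := by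
    intro p hp
    obtain ⟨k, v⟩ := p
    have hv : (chainsOf (PySem.Set.ofList lost)
        (PySem.List.sorted (PySem.Set.ofList lost) kA false)).getD k [] = v :=
      PySem.Dict.getD_of_mem_items _ hp hnodupkeys []
    rw [hgrp2, PySem.Dict.getD_foldl_modify_append] at hv
    simp only [PySem.Dict.getD_empty, List.nil_append, List.filter_map, List.map_map] at hv
    have hfl : v = (PySem.List.sorted (PySem.Set.ofList lost) kA false).filter
        (fun u => rt (PySem.Set.ofList lost) u == k) := by
      rw [← hv]
      simp only [Function.comp_def]
      simp
    show PySem.List.sorted v (fun x => PySem.Str.len x) false = v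
    rw [hfl]
    exact PySem.List.sorted_eq_self_of_pairwise _ _ (hlenpw.filter _)
  -- assemble
  show ((PySem.List.sorted2 (PySem.Set.ofList lost) (fun s => PySem.Str.len s) (fun s => s)
      false).foldl pvStepA (PySem.Dict.empty, PySem.Dict.empty)).1.items.map
      (fun p => (p.1, PySem.List.sorted p.2 (fun x => PySem.Str.len x) false))
    = ((PySem.List.sorted2
        ((PySem.List.sorted (PySem.Set.ofList lost) (fun s => s) false).foldl pvStepB ([], [])).1
        (fun p => PySem.Str.len p.1) (fun p => p.1) false).foldl
        (fun d p => d.modify p.2 [] (fun l => l ++ [p.1])) PySem.Dict.empty).items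
  rw [hLA_eq, hstA.1, hordEq, hgrp]
  rw [List.map_congr_left (g := id) (fun p hp => by rw [hval p hp]; rfl), List.map_id]

-- ===== VERDICT (by name: the statement is the Claim_ definition above) =====
theorem build_chains_from_lost_spec : Claim_equal_build_chains_from_lost := by
  unfold Claim_equal_build_chains_from_lost
  intro lost _
  unfold Spec_build_chains_from_lost
  exact pv_main lost
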